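-- pv_equiv track=rewrite | github.com/i0tool5/pysqlitemanager | pyments.py | max_elem_len_by_col
-- ===== SOURCE A (Python) =====
-- def max_elem_len_by_col(arr: "two-dimensional list") -> dict:
--     max_lengths = {}
--     columns = [elem for elem in zip(*arr)] or None
--     if columns is not None:
--         for i in range(len(columns)):
--             x = str(max(columns[i], key=lambda e: len(str(e))))
--             max_lengths[i] = len(x)
--
--     return max_lengths
-- ===== SOURCE B (Python) =====
-- def max_elem_len_by_col(arr):
--     if not arr:
--         return {}
--     m = min(len(row) for row in arr)
--     maxs = [0] * m
--     for row in arr: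
--         for i in range(m):
--             maxs[i] = max(maxs[i], len(str(row[i])))
--     return {i: v for i, v in enumerate(maxs)}
-- ===== Notes on version B (the rewrite author's own statement) =====
-- stated objective: alternative
-- what changed: B replaces the zip-transpose plus per-column max() scan with a row-major single pass that keeps a running-maximum array of length min(row lengths) and only builds the dict at the end via enumerate.
import Mathlib
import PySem

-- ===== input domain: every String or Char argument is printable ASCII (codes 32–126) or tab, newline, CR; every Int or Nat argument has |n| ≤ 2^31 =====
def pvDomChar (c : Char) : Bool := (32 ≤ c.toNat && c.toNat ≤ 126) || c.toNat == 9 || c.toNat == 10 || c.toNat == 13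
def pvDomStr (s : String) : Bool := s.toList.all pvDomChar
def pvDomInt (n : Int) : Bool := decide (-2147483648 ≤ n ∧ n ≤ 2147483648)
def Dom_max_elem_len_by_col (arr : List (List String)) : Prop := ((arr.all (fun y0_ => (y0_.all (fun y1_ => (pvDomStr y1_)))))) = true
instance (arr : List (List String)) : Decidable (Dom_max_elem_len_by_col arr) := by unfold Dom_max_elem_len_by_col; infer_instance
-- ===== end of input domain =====

-- B computes the same per-column maxima in a row-major single pass over a running-maximum
-- array instead of A's zip-transpose followed by a per-column max() scan (objective: alternative).

-- ===== PORT A =====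
-- Models Python's zip(*arr) exactly: the j-th tuple (as a list) of the rows' j-th elements,
-- truncated to the shortest row; every index j is < each row's length, so getD is exact.
def pvZipStar (arr : List (List String)) : List (List String) :=
  match arr with
  | [] => []
  | r :: rs =>
    (List.range (rs.foldl (fun acc row => min acc row.length) r.length)).map
      (fun j => (r :: rs).map (fun row => row.getD j ""))

def max_elem_len_by_col (arr : List (List String)) : List (Int × Int) :=
  let columns := pvZipStar arr
  -- 'columns or None' / 'if columns is not None': empty columns skip the loop
  if columns.isEmpty then (PySem.Dict.empty (κ := Int) (ν := Int)).items
  else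
    ((PySem.List.pyRange 0 (PySem.List.len columns) 1).foldl
      (fun (d : PySem.Dict Int Int) i =>
        -- x = str(max(columns[i], key=lambda e: len(str(e)))); elements are strings, str is identity.
        -- max() on an empty sequence cannot happen here (columns nonempty ⇒ every tuple nonempty), so getD "" is unreachable.
        d.insert i (PySem.Str.len
          ((PySem.List.max? (PySem.List.pyGetD columns i []) (fun e => PySem.Str.len e)).getD "")))
      PySem.Dict.empty).items

-- ===== PORT B =====
def max_elem_len_by_col_alt (arr : List (List String)) : List (Int × Int) :=
  match arr with
  | [] => (PySem.Dict.empty (κ := Int) (ν := Int)).items   -- if not arr: return {}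
  | r :: rs =>
    let m := rs.foldl (fun acc row => min acc row.length) r.length   -- min(len(row) for row in arr)
    let maxs := (r :: rs).foldl
      (fun maxs row =>
        (PySem.List.pyRange 0 (m : Int) 1).foldl
          (fun mx i =>
            PySem.List.pySetD mx i
              (max (PySem.List.pyGetD mx i 0) (PySem.Str.len (PySem.List.pyGetD row i ""))))
          maxs)
      (List.replicate m (0 : Int))                                   -- maxs = [0] * m
    -- {i: v for i, v in enumerate(maxs)}
    ((PySem.List.enumerate maxs).foldl
      (fun (d : PySem.Dict Int Int) p => d.insert p.1 p.2) PySem.Dict.empty).items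

-- ===== PRECONDITION & SPEC =====
def Spec_max_elem_len_by_col (arr : List (List String)) (out : List (Int × Int)) : Prop := out = max_elem_len_by_col_alt arr
instance (arr : List (List String)) (out : List (Int × Int)) : Decidable (Spec_max_elem_len_by_col arr out) := by unfold Spec_max_elem_len_by_col; infer_instance

-- ===== CLAIM (what is proved, stated in full; the proofs are below) =====
def Claim_equal_max_elem_len_by_col : Prop := ∀ (arr : List (List String)), Dom_max_elem_len_by_col arr → Spec_max_elem_len_by_col arr (max_elem_len_by_col arr)

-- ===== LEMMAS AND PROOFS =====

-- proof-only helper: the running column maximum B maintains (and A's max() realises)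
def pvColMax (arr : List (List String)) (j : Nat) : Int :=
  arr.foldl (fun acc row => max acc (PySem.Str.len (row.getD j ""))) 0

theorem pv_getD_set (mx : List Int) (j : Nat) (X : Int) (i : Nat) :
    (mx.set j X).getD i 0 = if i = j ∧ j < mx.length then X else mx.getD i 0 := by
  simp only [List.getD_eq_getElem?_getD, List.getElem?_set]
  split_ifs <;> simp_all

theorem pv_setfold_length (c : Nat → Int) (l : List Nat) : ∀ mx : List Int,
    (l.foldl (fun v j => v.set j (max (v.getD j 0) (c j))) mx).length = mx.length := by
  induction l with
  | nil => intro mx; rfl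
  | cons j t ih => intro mx; rw [List.foldl_cons, ih, List.length_set]

theorem pv_setfold_getD (c : Nat → Int) (l : List Nat) (hnd : l.Nodup) : ∀ (mx : List Int) (i : Nat),
    (l.foldl (fun v j => v.set j (max (v.getD j 0) (c j))) mx).getD i 0 =
      if i ∈ l ∧ i < mx.length then max (mx.getD i 0) (c i) else mx.getD i 0 := by
  induction l with
  | nil => intro mx i; simp
  | cons j t ih =>
    intro mx i
    rw [List.foldl_cons, ih (List.nodup_cons.mp hnd).2, List.length_set,
      pv_getD_set]
    have hnotm : j ∉ t := (List.nodup_cons.mp hnd).1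
    by_cases hij : i = j
    · subst hij
      by_cases hl : i < mx.length <;> simp [hnotm, hl, List.mem_cons]
    · simp [List.mem_cons, hij]

theorem pv_rowsfold_length (m : Nat) (rows : List (List String)) : ∀ (mx : List Int),
    (rows.foldl (fun maxs row =>
      (List.range m).foldl
        (fun v j => v.set j (max (v.getD j 0) (PySem.Str.len (row.getD j "")))) maxs) mx).length
      = mx.length := by
  induction rows with
  | nil => intro mx; rfl
  | cons row t ih => intro mx; rw [List.foldl_cons, ih, pv_setfold_length]

theorem pv_rowsfold_getD (m : Nat) (rows : List (List String)) : ∀ (mx : List Int), mx.length = m →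
    ∀ i : Nat, i < m →
    (rows.foldl (fun maxs row =>
      (List.range m).foldl
        (fun v j => v.set j (max (v.getD j 0) (PySem.Str.len (row.getD j "")))) maxs) mx).getD i 0
      = rows.foldl (fun acc row => max acc (PySem.Str.len (row.getD i ""))) (mx.getD i 0) := by
  induction rows with
  | nil => intro mx _ i _; rfl
  | cons row t ih =>
    intro mx hmx i hi
    rw [List.foldl_cons, List.foldl_cons,
      ih _ (by rw [pv_setfold_length]; exact hmx) i hi,
      pv_setfold_getD _ _ (List.nodup_range),
      if_pos ⟨List.mem_range.mpr hi, by omega⟩]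

theorem pv_maxlen (xs : List String) (hne : xs ≠ []) :
    PySem.Str.len ((PySem.List.max? xs (fun e => PySem.Str.len e)).getD "") =
      xs.foldl (fun acc y => max acc (PySem.Str.len y)) 0 := by
  obtain ⟨mx, hmx⟩ : ∃ mx, PySem.List.max? xs (fun e => PySem.Str.len e) = some mx := by
    cases h : PySem.List.max? xs (fun e => PySem.Str.len e) with
    | none => exact absurd ((PySem.List.max?_eq_none_iff xs (fun e => PySem.Str.len e)).mp h) hne
    | some mx => exact ⟨mx, rfl⟩
  rw [hmx, Option.getD_some]
  have hmem := PySem.List.max?_mem hmx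
  have hmax := PySem.List.max?_isMax hmx
  have hfold := PySem.List.le_foldl_max_int xs (fun e => PySem.Str.len e) 0
  have h1 : PySem.Str.len mx ≤ xs.foldl (fun acc y => max acc (PySem.Str.len y)) 0 :=
    hfold.2 mx hmem
  have h2 : xs.foldl (fun acc y => max acc (PySem.Str.len y)) 0 ≤ PySem.Str.len mx := by
    have hm := PySem.List.foldl_max_mem (xs.map (fun e => PySem.Str.len e)) 0
    rw [List.foldl_map] at hm
    rcases hm with h0 | hmem'
    · rw [h0]; simp
    · obtain ⟨y, hy, hey⟩ := List.mem_map.mp hmem'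
      rw [← hey]; exact hmax y hy
  omega

theorem pv_A (r : List String) (rs : List (List String)) :
    max_elem_len_by_col (r :: rs) =
      (PySem.List.pyRange 0 ((rs.foldl (fun acc row => min acc row.length) r.length : Nat) : Int) 1).map
        (fun i => (i, pvColMax (r :: rs) i.toNat)) := by
  set m := rs.foldl (fun acc row => min acc row.length) r.length with hm
  unfold max_elem_len_by_col pvZipStar
  dsimp only
  rw [← hm]
  by_cases hm0 : m = 0
  · simp only [hm0]
    simp
    rfl
  ·
    have hne : ((List.range m).map
        (fun j => (r :: rs).map (fun row => row.getD j ""))).isEmpty = false := by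
      simp [List.range_eq_nil, hm0]
    simp only [hne, Bool.false_eq_true, if_false, PySem.List.len_eq, List.length_map,
      List.length_range]
    rw [PySem.Dict.items_foldl_insert_fresh _ (fun a => a)
      (fun i => PySem.Str.len ((PySem.List.max?
        (PySem.List.pyGetD ((List.range m).map (fun j => (r :: rs).map (fun row => row.getD j ""))) i [])
        (fun e => PySem.Str.len e)).getD ""))
      PySem.Dict.empty (by intro a _; simp) (by simp [PySem.List.nodup_pyRange_one])]
    show [] ++ _ = _
    rw [List.nil_append]
    apply List.map_congr_left
    intro i hi
    obtain ⟨h0, hlt⟩ := PySem.List.mem_pyRange_one.mp hi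
    have hn : ((i.toNat : Nat) : Int) = i := Int.toNat_of_nonneg h0
    have hnm : i.toNat < m := by omega
    refine Prod.ext rfl ?_
    show PySem.Str.len _ = _
    rw [← hn, PySem.List.pyGetD_natCast]
    rw [List.getD_eq_getElem _ _ (by simpa using hnm)]
    simp only [List.getElem_map, List.getElem_range]
    rw [pv_maxlen _ (by simp)]
    rw [List.foldl_map]
    rfl

theorem pv_B (r : List String) (rs : List (List String)) :
    max_elem_len_by_col_alt (r :: rs) =
      (PySem.List.pyRange 0 ((rs.foldl (fun acc row => min acc row.length) r.length : Nat) : Int) 1).map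
        (fun i => (i, pvColMax (r :: rs) i.toNat)) := by
  set m := rs.foldl (fun acc row => min acc row.length) r.length with hm
  unfold max_elem_len_by_col_alt
  dsimp only
  rw [← hm]
  have hpr : PySem.List.pyRange 0 (m : Int) 1 = (List.range m).map Int.ofNat := by
    rw [PySem.List.pyRange_one]
    norm_num
  conv_lhs => rw [hpr]
  simp only [List.foldl_map, Int.ofNat_eq_natCast, PySem.List.pySetD_natCast,
    PySem.List.pyGetD_natCast]
  set maxs := (r :: rs).foldl
    (fun maxs row => (List.range m).foldl
      (fun v j => v.set j (max (v.getD j 0) (PySem.Str.len (row.getD j "")))) maxs)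
    (List.replicate m (0 : Int)) with hmaxs
  have hlen : maxs.length = m := by rw [hmaxs, pv_rowsfold_length]; simp
  rw [PySem.Dict.items_foldl_insert_fresh _ Prod.fst Prod.snd
    PySem.Dict.empty (by intro a _; simp) (by
      show ((PySem.List.enumerate maxs).map (fun x => x.1)).Nodup
      rw [PySem.List.map_fst_enumerate]; exact PySem.List.nodup_pyRange_one _ _)]
  show [] ++ _ = _
  rw [List.nil_append]
  rw [PySem.List.enumerate_eq_map_pyRange maxs 0]
  simp only [List.map_map, PySem.List.len_eq, hlen]
  apply List.map_congr_left
  intro i hi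
  obtain ⟨h0, hlt⟩ := PySem.List.mem_pyRange_one.mp hi
  have hn : ((i.toNat : Nat) : Int) = i := Int.toNat_of_nonneg h0
  have hnm : i.toNat < m := by omega
  show (i, _) = (i, _)
  refine Prod.ext rfl ?_
  show PySem.List.pyGetD maxs i 0 = _
  rw [← hn, PySem.List.pyGetD_natCast]
  rw [hmaxs, pv_rowsfold_getD m (r :: rs) _ (by simp) _ hnm]
  simp [pvColMax]
  rw [max_eq_left h0]

theorem pv_main : ∀ (arr : List (List String)),
    max_elem_len_by_col arr = max_elem_len_by_col_alt arr := by
  intro arr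
  match arr with
  | [] => rfl
  | r :: rs => rw [pv_A, pv_B]

-- ===== VERDICT (by name: the statement is the Claim_ definition above) =====
theorem max_elem_len_by_col_spec : Claim_equal_max_elem_len_by_col := by
  intro arr _
  unfold Spec_max_elem_len_by_col
  exact pv_main arr
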